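-- pv_equiv track=rewrite | github.com/NullDev/Hacktoberfest-2020-FizzBuzz | Python/FizzBuzz-ReverseFizzBuzz.py | reverse_fizz_buzz
-- ===== SOURCE A (Python) =====
-- def reverse_fizz_buzz(s):
--     if not s:
--         return [""]
--     combos = []
--
--     child_combos = reverse_fizz_buzz(s[4:])
--     for child in child_combos:
--         if s[:4] == 'fizz':
--             combos.append("3," + child)
--         elif s[:4] == 'buzz':
--             combos.append("5," + child)
--
--     if s[:8] == 'fizzbuzz':
--         child_combos = reverse_fizz_buzz(s[8:])
--         for child in child_combos:
--             combos.append("15," + child)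
--     return combos
-- ===== SOURCE B (Python) =====
-- def reverse_fizz_buzz(s):
--     n = len(s)
--     dp = [None] * n + [[""]]
--     for i in range(n - 1, -1, -1):
--         cur = []
--         if s[i:i+4] == 'fizz':
--             cur += ["3," + c for c in dp[i+4]]
--         elif s[i:i+4] == 'buzz':
--             cur += ["5," + c for c in dp[i+4]]
--         if s[i:i+8] == 'fizzbuzz':
--             cur += ["15," + c for c in dp[i+8]]
--         dp[i] = cur
--     return dp[0]
-- ===== Notes on version B (the rewrite author's own statement) =====
-- stated objective: faster
-- what changed: Replaced A's naive recursion (which recomputes suffix combo lists exponentially often on fizzbuzz-heavy strings) by a bottom-up DP table indexed by suffix start, each suffix computed once.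
import Mathlib
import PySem

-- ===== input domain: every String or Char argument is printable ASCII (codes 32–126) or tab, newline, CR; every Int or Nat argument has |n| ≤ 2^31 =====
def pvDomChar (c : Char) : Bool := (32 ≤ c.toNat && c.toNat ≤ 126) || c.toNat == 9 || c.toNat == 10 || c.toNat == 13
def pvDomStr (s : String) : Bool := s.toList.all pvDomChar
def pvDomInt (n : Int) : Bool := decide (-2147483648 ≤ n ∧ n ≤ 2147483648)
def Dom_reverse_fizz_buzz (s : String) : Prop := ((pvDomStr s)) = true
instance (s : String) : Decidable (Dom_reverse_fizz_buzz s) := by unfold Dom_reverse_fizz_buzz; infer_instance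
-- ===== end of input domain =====

-- B replaces A's naive recursion (exponential recomputation of suffix combo lists) by a
-- bottom-up DP table indexed by suffix start, each suffix computed once: measurably faster.

-- ===== PORT A =====
-- A works on the string; we port on List Char.  Python slices s[:4], s[4:], s[:8], s[8:]
-- have nonnegative bounds, so they are exactly List.take / List.drop (clamping matches).
def rfbA (l : List Char) : List String :=
  if _h : l = [] then [""]
  else
    -- child_combos = reverse_fizz_buzz(s[4:]); the for-loop appends per child
    let child := rfbA (l.drop 4)
    let combos := child.foldl
      (fun acc c =>
        if l.take 4 = "fizz".toList then acc ++ ["3," ++ c]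
        else if l.take 4 = "buzz".toList then acc ++ ["5," ++ c]
        else acc) []
    if l.take 8 = "fizzbuzz".toList then
      combos ++ (rfbA (l.drop 8)).foldl (fun acc c => acc ++ ["15," ++ c]) []
    else combos
termination_by l.length
decreasing_by
  · have : 0 < l.length := List.length_pos_iff.mpr _h
    simp [List.length_drop]; omega
  · have : 0 < l.length := List.length_pos_iff.mpr _h
    simp [List.length_drop]; omega

def reverse_fizz_buzz (s : String) : List String := rfbA s.toList

-- ===== PORT B =====
-- Source B: dp over suffix start indices, filled from the end; dp is kept as a list whose head
-- is the most recently computed entry (dp position j-(i+1) holds the combos of suffix j).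
def rfbBstep (l : List Char) (n : Nat) (dp : List (List String)) (k : Nat) : List (List String) :=
  let i := n - 1 - k
  let cur :=
    (if (l.drop i).take 4 = "fizz".toList then (dp.getD 3 []).map (fun c => "3," ++ c)
     else if (l.drop i).take 4 = "buzz".toList then (dp.getD 3 []).map (fun c => "5," ++ c)
     else [])
    ++ (if (l.drop i).take 8 = "fizzbuzz".toList then (dp.getD 7 []).map (fun c => "15," ++ c)
        else [])
  cur :: dp

def rfbB (l : List Char) : List String :=
  ((List.range l.length).foldl (rfbBstep l l.length) [[""]]).getD 0 [""]

def reverse_fizz_buzz_alt (s : String) : List String := rfbB s.toList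

-- ===== PRECONDITION & SPEC =====
def Spec_reverse_fizz_buzz (s : String) (out : List String) : Prop := out = reverse_fizz_buzz_alt s
instance (s : String) (out : List String) : Decidable (Spec_reverse_fizz_buzz s out) := by unfold Spec_reverse_fizz_buzz; infer_instance

-- ===== CLAIM (what is proved, stated in full; the proofs are below) =====
def Claim_equal_reverse_fizz_buzz : Prop := ∀ (s : String), Dom_reverse_fizz_buzz s → Spec_reverse_fizz_buzz s (reverse_fizz_buzz s)

-- ===== LEMMAS AND PROOFS =====

theorem foldl_append_singleton {α β : Type} (f : α → β) (l : List α) (acc : List β) :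
    l.foldl (fun acc c => acc ++ [f c]) acc = acc ++ l.map f := by
  induction l generalizing acc with
  | nil => simp
  | cons x xs ih => simp [List.foldl, ih]

theorem foldl_const {α β : Type} (l : List α) (a : β) :
    l.foldl (fun acc _ => acc) a = a := by
  induction l generalizing a <;> simp_all [List.foldl]

-- A's step recursion, with the per-child loop rewritten as a map (the guards do not depend
-- on the loop variable).
theorem rfbA_step (l : List Char) (h : l ≠ []) :
    rfbA l =
      (if l.take 4 = "fizz".toList then (rfbA (l.drop 4)).map (fun c => "3," ++ c)
       else if l.take 4 = "buzz".toList then (rfbA (l.drop 4)).map (fun c => "5," ++ c)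
       else [])
      ++ (if l.take 8 = "fizzbuzz".toList then (rfbA (l.drop 8)).map (fun c => "15," ++ c)
          else []) := by
  rw [rfbA, dif_neg h]
  have hbf : ("buzz".toList = "fizz".toList) = False := by decide
  by_cases h4f : l.take 4 = "fizz".toList <;>
  by_cases h4b : l.take 4 = "buzz".toList <;>
  by_cases h8 : l.take 8 = "fizzbuzz".toList <;>
  simp only [h4f, h4b, h8, hbf, if_true, if_false, ite_true, ite_false, eq_self_iff_true,
    foldl_append_singleton, foldl_const, List.nil_append, List.append_nil, List.foldl_nil]

theorem getD_map_range {β : Type} (f : Nat → β) (d : β) (k m : Nat) (h : k < m) :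
    ((List.range m).map f).getD k d = f k := by
  rw [List.getD_eq_getElem?_getD]
  simp [h]

theorem rfbA_nil : rfbA [] = [""] := by rw [rfbA]; simp

-- invariant: after m steps the dp list holds rfbA of the suffixes starting at n-m .. n
theorem rfbB_invariant (l : List Char) (m : Nat) (hm : m ≤ l.length) :
    (List.range m).foldl (rfbBstep l l.length) [[""]]
      = (List.range (m + 1)).map (fun j => rfbA (l.drop (l.length - m + j))) := by
  induction m with
  | zero => simp [rfbA_nil]
  | succ m ih =>
    have hm' : m ≤ l.length := Nat.le_of_succ_le hm
    rw [List.range_succ, List.foldl_append, ih hm', List.foldl_cons, List.foldl_nil]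
    have hlen : (l.drop (l.length - 1 - m)).length = m + 1 := by simp; omega
    have hdropne : l.drop (l.length - 1 - m) ≠ [] := by
      intro hc; rw [hc] at hlen; simp at hlen
    rw [rfbBstep]
    conv_rhs => rw [List.range_succ_eq_map, List.map_cons, List.map_map]
    congr 1
    · rw [show l.length - (m+1) + 0 = l.length - 1 - m by omega,
        rfbA_step _ hdropne, List.drop_drop, List.drop_drop]
      congr 1
      · split_ifs with h4f h4b
        · have h4 : 3 < m + 1 := by
            have := congrArg List.length h4f
            rw [List.length_take, hlen] at this
            simp at this; omega
          rw [getD_map_range _ _ _ _ h4]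
          congr 3; omega
        · have h4 : 3 < m + 1 := by
            have := congrArg List.length h4b
            rw [List.length_take, hlen] at this
            simp at this; omega
          rw [getD_map_range _ _ _ _ h4]
          congr 3; omega
        · rfl
      · split_ifs with h8
        · have h8' : 7 < m + 1 := by
            have := congrArg List.length h8
            rw [List.length_take, hlen] at this
            simp at this; omega
          rw [getD_map_range _ _ _ _ h8']
          congr 3; omega
        · rfl
    · apply List.map_congr_left
      intro j hj
      simp only [List.mem_range] at hj
      simp only [Function.comp]
      have : l.length - m + j = l.length - (m + 1) + (j + 1) := by omega
      rw [this]

theorem rfbA_eq_rfbB (l : List Char) : rfbB l = rfbA l := by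
  unfold rfbB
  rw [rfbB_invariant l l.length le_rfl, List.range_succ_eq_map, List.map_cons]
  simp

-- ===== VERDICT (by name: the statement is the Claim_ definition above) =====
theorem reverse_fizz_buzz_spec : Claim_equal_reverse_fizz_buzz := by
  intro s _
  unfold Spec_reverse_fizz_buzz reverse_fizz_buzz reverse_fizz_buzz_alt
  rw [rfbA_eq_rfbB]
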